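-- pv_equiv track=rewrite | github.com/mostafa-sadeghi/amirali_eslami | aban_26.py | largest_sequence
-- ===== SOURCE A (Python) =====
-- def largest_sequence(l):
--     max_distance = 0
--     largest_item = ()
--     for item in l:
--         if item[1]-item[0] > max_distance:
--             max_distance = item[1]-item[0]
--             largest_item = item
--     return largest_item
-- ===== SOURCE B (Python) =====
-- def largest_sequence(l):
--     cand = [item for item in l if item[1] - item[0] > 0]
--     if not cand:
--         return ()
--     return max(cand, key=lambda item: item[1] - item[0])
-- ===== Notes on version B (the rewrite author's own statement) =====
-- stated objective: simpler
-- what changed: Replaces the single scan that threads a running (max_distance, best_item) pair through the loop by a filter of the positive-difference items followed by a built-in max with a key function (first maximal on ties, matching A's strict-greater update).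
-- outside the precondition, e.g. on largest_sequence([(3, 1)]): A returns (), B returns (); on largest_sequence([]): A returns (), B returns ()
import Mathlib
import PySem

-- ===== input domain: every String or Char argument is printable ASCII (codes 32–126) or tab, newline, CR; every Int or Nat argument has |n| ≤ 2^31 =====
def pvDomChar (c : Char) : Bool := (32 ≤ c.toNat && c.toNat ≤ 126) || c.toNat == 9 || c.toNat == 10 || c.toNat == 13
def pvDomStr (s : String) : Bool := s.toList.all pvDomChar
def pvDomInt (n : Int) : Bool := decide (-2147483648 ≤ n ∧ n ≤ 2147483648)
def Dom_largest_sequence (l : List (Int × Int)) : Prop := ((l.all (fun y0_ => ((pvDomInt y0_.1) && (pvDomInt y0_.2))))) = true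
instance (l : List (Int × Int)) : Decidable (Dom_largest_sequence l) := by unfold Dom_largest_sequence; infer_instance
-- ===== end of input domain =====

-- B replaces A's single scan threading (max_distance, best) with a filter of the
-- positive-difference items followed by max-with-key (simpler decomposition; same cost).

-- ===== PORT A =====
-- A's loop threads (max_distance, largest_item); the initial largest_item '()' is
-- modelled as 'none' (it is not an Int × Int; Pre_ excludes the inputs where it is returned).
def largest_sequence (l : List (Int × Int)) : Int × Int :=
  let st := l.foldl
    (fun (st : Int × Option (Int × Int)) item =>
      if item.2 - item.1 > st.1 then (item.2 - item.1, some item) else st)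
    (0, none)
  match st.2 with
  | some it => it
  | none => (0, 0)   -- Python returns '()' here, not an int pair; outside Pre_

-- ===== PORT B =====
def largest_sequence_alt (l : List (Int × Int)) : Int × Int :=
  let cand := l.filter (fun item => decide (item.2 - item.1 > 0))
  match PySem.List.max? cand (fun item => item.2 - item.1) with
  | some m => m
  | none => (0, 0)   -- Python returns '()' here, not an int pair; outside Pre_

-- ===== PRECONDITION & SPEC =====
-- Pre_ excludes exactly the inputs (no pair with second component strictly greater than
-- the first) on which A returns the empty tuple '()', which is not a value of type Int × Int.
def Pre_largest_sequence (l : List (Int × Int)) : Prop :=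
  (l.any (fun item => decide (item.2 - item.1 > 0))) = true
instance (l : List (Int × Int)) : Decidable (Pre_largest_sequence l) := by
  unfold Pre_largest_sequence; infer_instance
def pvWitness_largest_sequence : (List (Int × Int)) := [(1, 5), (2, 2)]
def Spec_largest_sequence (l : List (Int × Int)) (out : Int × Int) : Prop := out = largest_sequence_alt l
instance (l : List (Int × Int)) (out : Int × Int) : Decidable (Spec_largest_sequence l out) := by unfold Spec_largest_sequence; infer_instance

-- ===== CLAIM (what is proved, stated in full; the proofs are below) =====
def Claim_equal_largest_sequence : Prop := ∀ (l : List (Int × Int)), Dom_largest_sequence l → Pre_largest_sequence l → Spec_largest_sequence l (largest_sequence l)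

-- ===== LEMMAS AND PROOFS =====

-- one step of A's loop
def stepA (st : Int × Option (Int × Int)) (item : Int × Int) : Int × Option (Int × Int) :=
  if item.2 - item.1 > st.1 then (item.2 - item.1, some item) else st

-- one step of max?'s fold
def stepM (acc : Option (Int × Int)) (x : Int × Int) : Option (Int × Int) :=
  match acc with
  | none => some x
  | some m => if m.2 - m.1 < x.2 - x.1 then some x else some m

lemma main_some (l : List (Int × Int)) : ∀ (b : Int × Int), 0 < b.2 - b.1 →
    (l.foldl stepA (b.2 - b.1, some b)).2 =
      (l.filter (fun item => decide (item.2 - item.1 > 0))).foldl stepM (some b) := by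
  induction l with
  | nil => intro b _; rfl
  | cons x t ih =>
    intro b hb
    by_cases hx : x.2 - x.1 > b.2 - b.1
    · have hx0 : 0 < x.2 - x.1 := lt_trans hb hx
      have e1 : stepA (b.2 - b.1, some b) x = (x.2 - x.1, some x) := by simp [stepA, hx]
      rw [List.foldl_cons, e1, List.filter_cons, decide_eq_true hx0, if_pos rfl,
        List.foldl_cons, show stepM (some b) x = some x by simp [stepM, hx]]
      exact ih x hx0
    · have e1 : stepA (b.2 - b.1, some b) x = (b.2 - b.1, some b) := by simp [stepA, hx]
      rw [List.foldl_cons, e1, List.filter_cons]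
      by_cases hx0 : 0 < x.2 - x.1
      · rw [decide_eq_true hx0, if_pos rfl, List.foldl_cons,
          show stepM (some b) x = some b by simp [stepM, hx]]
        exact ih b hb
      · rw [decide_eq_false hx0, if_neg Bool.false_ne_true]
        exact ih b hb

lemma main_none (l : List (Int × Int)) :
    (l.foldl stepA (0, none)).2 =
      (l.filter (fun item => decide (item.2 - item.1 > 0))).foldl stepM none := by
  induction l with
  | nil => rfl
  | cons x t ih =>
    by_cases hx0 : 0 < x.2 - x.1
    · have e1 : stepA (0, none) x = (x.2 - x.1, some x) := by
        unfold stepA; rw [if_pos hx0]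
      rw [List.foldl_cons, e1, List.filter_cons, decide_eq_true hx0, if_pos rfl,
        List.foldl_cons, show stepM none x = some x from rfl]
      exact main_some t x hx0
    · have e1 : stepA (0, none) x = (0, none) := by
        unfold stepA; rw [if_neg hx0]
      rw [List.foldl_cons, e1, List.filter_cons, decide_eq_false hx0,
        if_neg Bool.false_ne_true]
      exact ih

lemma foldl_eq_max? (l : List (Int × Int)) :
    (l.foldl stepA (0, none)).2 =
      PySem.List.max? (l.filter (fun item => decide (item.2 - item.1 > 0)))
        (fun item => item.2 - item.1) := by
  rw [main_none]
  unfold PySem.List.max?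
  congr 1
  funext acc x
  cases acc <;> simp [stepM]

-- ===== VERDICT (by name: the statement is the Claim_ definition above) =====
theorem largest_sequence_spec : Claim_equal_largest_sequence := by
  intro l _ _
  unfold Spec_largest_sequence largest_sequence largest_sequence_alt
  simp only []
  rw [show (fun (st : Int × Option (Int × Int)) item =>
      if item.2 - item.1 > st.1 then (item.2 - item.1, some item) else st) = stepA from rfl]
  rw [foldl_eq_max?]
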